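-- pv_equiv track=rewrite | github.com/namisan/mt-dnn | data_utils/tokenizer_utils.py | split_pre_and_post_punc
-- ===== SOURCE A (Python) =====
-- import unicodedata
--
-- def _is_punctuation(char):
--     """Checks whether `chars` is a punctuation character."""
--     cp = ord(char)
--     # We treat all non-letter/number ASCII as punctuation.
--     # Characters such as "^", "$", and "`" are not in the Unicode
--     # Punctuation class but we treat them as punctuation anyways, for
--     # consistency.
--     if ((cp >= 33 and cp <= 47) or (cp >= 58 and cp <= 64) or
--         (cp >= 91 and cp <= 96) or (cp >= 123 and cp <= 126)):
--         return True
--     cat = unicodedata.category(char)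
--     if cat.startswith("P"):
--         return True
--     return False
--
-- def split_pre_and_post_punc(tokens):
--     def pre_punc(token):
--         last_j = 0
--         for j in range(1, len(token)):
--             if not _is_punctuation(token[j]):
--                 last_j = j
--                 break
--         return token[:last_j], token[last_j:]
--     def post_punc(token):
--         last_j = len(token)
--         for j in range(len(token) - 2, -1, -1):
--             is_punc = _is_punctuation(token[j])
--             if not _is_punctuation(token[j]):
--                 last_j = j + 1
--                 break
--         return token[:last_j], token[last_j:]
--     new_tokens = []
--     for token in tokens:
--         if len(token) > 1 and _is_punctuation(token[0]):
--             a, b = pre_punc(token)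
--             if a:
--                 new_tokens.append(a)
--             if b:
--                 if _is_punctuation(b[-1]):
--                     c, d = post_punc(b)
--                     if c:
--                         new_tokens.append(c)
--                     if d:
--                         new_tokens.append(d)
--                 else:
--                     new_tokens.append(b)
--         elif len(token) > 1 and _is_punctuation(token[-1]):
--             a, b = post_punc(token)
--             if a:
--                 new_tokens.append(a)
--             if b:
--                 new_tokens.append(b)
--         else:
--             new_tokens.append(token)
--     return new_tokens
-- ===== SOURCE B (Python) =====
-- import unicodedata
--
-- def _is_punctuation(char):
--     """Checks whether `chars` is a punctuation character."""
--     cp = ord(char)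
--     if ((cp >= 33 and cp <= 47) or (cp >= 58 and cp <= 64) or
--         (cp >= 91 and cp <= 96) or (cp >= 123 and cp <= 126)):
--         return True
--     cat = unicodedata.category(char)
--     if cat.startswith("P"):
--         return True
--     return False
--
-- def _runs(s):
--     """Run-length decomposition of s by punctuation-ness: a list of
--     (flag, maximal run of consecutive chars whose _is_punctuation is flag)."""
--     if not s:
--         return []
--     p = _is_punctuation(s[0])
--     k = 1
--     while k < len(s) and _is_punctuation(s[k]) == p:
--         k += 1
--     return [(p, s[:k])] + _runs(s[k:])
--
-- def split_pre_and_post_punc(tokens):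
--     out = []
--     for tok in tokens:
--         if len(tok) <= 1:
--             out.append(tok)
--             continue
--         groups = _runs(tok)
--         if len(groups) == 1:
--             out.append(tok)
--             continue
--         pre = groups[0][1] if groups[0][0] else ''
--         suf = groups[-1][1] if groups[-1][0] else ''
--         core = tok[len(pre):len(tok) - len(suf)]
--         if pre:
--             out.append(pre)
--         out.append(core)
--         if suf:
--             out.append(suf)
--     return out
-- ===== Notes on version B (the rewrite author's own statement) =====
-- stated objective: alternative
-- what changed: Replaces A's two directional boundary scans with nested pre/post helpers and a three-way branch tree by a groupby-style run-length decomposition of each token into maximal punctuation/non-punctuation runs, emitting the first run (if punctuation), the middle slice, and the last run (if punctuation).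
import Mathlib
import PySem

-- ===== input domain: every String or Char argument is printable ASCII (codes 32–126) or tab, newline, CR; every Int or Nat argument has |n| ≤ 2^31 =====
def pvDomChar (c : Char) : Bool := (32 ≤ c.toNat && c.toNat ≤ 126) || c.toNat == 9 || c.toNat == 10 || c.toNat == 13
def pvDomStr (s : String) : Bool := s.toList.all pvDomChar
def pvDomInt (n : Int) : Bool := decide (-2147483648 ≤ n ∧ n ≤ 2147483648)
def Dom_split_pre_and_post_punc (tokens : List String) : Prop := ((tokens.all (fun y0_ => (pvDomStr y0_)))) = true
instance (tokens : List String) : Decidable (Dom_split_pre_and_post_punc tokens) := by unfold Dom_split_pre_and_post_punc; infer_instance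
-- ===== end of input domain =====

-- B replaces A's two directional boundary scans and three-way branch tree by a
-- run-length decomposition of each token into maximal punctuation/non-punctuation
-- runs, emitting first run (if punct) / middle slice / last run (if punct);
-- objective: alternative (same cost, different algorithmic decomposition).

-- ===== PORT A =====
-- _is_punctuation: exact on the ASCII domain (Dom): for ASCII characters the
-- unicodedata P* categories are contained in these four code ranges.
def isPunc (c : Char) : Bool :=
  let cp := c.toNat
  (33 ≤ cp && cp ≤ 47) || (58 ≤ cp && cp ≤ 64) || (91 ≤ cp && cp ≤ 96) || (123 ≤ cp && cp ≤ 126)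

-- `for j in range(1, len(token)): if not _is_punctuation(token[j]): last_j = j; break`
-- (indices are in range, so `getD` is exact for Python's `token[j]`)
def prePuncLoop (t : List Char) (j : Nat) : Nat :=
  if j < t.length then
    if ¬ isPunc (t.getD j ' ') then j else prePuncLoop t (j + 1)
  else 0
termination_by t.length - j

-- slices `token[:last_j]`, `token[last_j:]` with `0 ≤ last_j ≤ len`: take/drop is exact
def prePunc (t : List Char) : List Char × List Char :=
  let lastJ := prePuncLoop t 1
  (t.take lastJ, t.drop lastJ)

-- `for j in range(len(token) - 2, -1, -1): …`; the argument is the current index + 1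
def postPuncLoop (t : List Char) : Nat → Nat
  | 0 => t.length
  | j + 1 => if ¬ isPunc (t.getD j ' ') then j + 1 else postPuncLoop t j

def postPunc (t : List Char) : List Char × List Char :=
  let lastJ := postPuncLoop t (t.length - 1)
  (t.take lastJ, t.drop lastJ)

-- body of A's `for token in tokens` loop: the strings appended during that iteration,
-- in order (`token[-1]` = `getD (len-1)`, exact since the token is nonempty there)
def procTokenA (token : String) : List String :=
  let t := token.toList
  if 1 < t.length ∧ isPunc (t.getD 0 ' ') then
    let ab := prePunc t
    (if ab.1 ≠ [] then [String.ofList ab.1] else []) ++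
    (if ab.2 ≠ [] then
      (if isPunc (ab.2.getD (ab.2.length - 1) ' ') then
        let cd := postPunc ab.2
        (if cd.1 ≠ [] then [String.ofList cd.1] else []) ++
        (if cd.2 ≠ [] then [String.ofList cd.2] else [])
      else [String.ofList ab.2])
    else [])
  else if 1 < t.length ∧ isPunc (t.getD (t.length - 1) ' ') then
    let ab := postPunc t
    (if ab.1 ≠ [] then [String.ofList ab.1] else []) ++
    (if ab.2 ≠ [] then [String.ofList ab.2] else [])
  else [token]

def split_pre_and_post_punc (tokens : List String) : List String :=
  tokens.foldl (fun acc token => acc ++ procTokenA token) []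

-- ===== PORT B =====
-- `while k < len(s) and _is_punctuation(s[k]) == p: k += 1` of B's _runs helper
def spanLen (t : List Char) (p : Bool) (k : Nat) : Nat :=
  if k < t.length then
    if isPunc (t.getD k ' ') = p then spanLen t p (k + 1) else k
  else k
termination_by t.length - k

-- termination measure for `runs` (the recursive call is on `s[k:]` with k ≥ 1)
theorem spanLen_ge (t : List Char) (p : Bool) (k : Nat) : k ≤ spanLen t p k := by
  fun_induction spanLen t p k with
  | case1 k hlt hp ih => omega
  | case2 k hlt hnp => exact le_rfl
  | case3 k h => exact le_rfl

-- B's _runs: `[(p, s[:k])] + _runs(s[k:])` (k ∈ [1, len], so take/drop is exact)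
def runs : List Char → List (Bool × List Char)
  | [] => []
  | c :: cs =>
    let p := isPunc c
    let k := spanLen (c :: cs) p 1
    (p, (c :: cs).take k) :: runs ((c :: cs).drop k)
termination_by t => t.length
decreasing_by
  simp only [List.length_drop]
  have := spanLen_ge (c :: cs) (isPunc c) 1
  simp only [List.length_cons]
  omega

-- body of B's loop: `groups[0]`/`groups[-1]` via headD/getLastD (groups is nonempty
-- there); `tok[len(pre):len(tok)-len(suf)]` with 0 ≤ a ≤ b ≤ len, so take/drop exact
def procTokenB (token : String) : List String :=
  let t := token.toList
  if t.length ≤ 1 then [token]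
  else
    let gs := runs t
    if gs.length = 1 then [token]
    else
      let g0 := gs.headD (false, [])
      let gl := gs.getLastD (false, [])
      let pre := if g0.1 then g0.2 else []
      let suf := if gl.1 then gl.2 else []
      let core := (t.take (t.length - suf.length)).drop pre.length
      (if pre ≠ [] then [String.ofList pre] else []) ++
      [String.ofList core] ++
      (if suf ≠ [] then [String.ofList suf] else [])

def split_pre_and_post_punc_alt (tokens : List String) : List String :=
  tokens.foldl (fun acc token => acc ++ procTokenB token) []

-- ===== PRECONDITION & SPEC =====
def Spec_split_pre_and_post_punc (tokens : List String) (out : List String) : Prop := out = split_pre_and_post_punc_alt tokens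
instance (tokens : List String) (out : List String) : Decidable (Spec_split_pre_and_post_punc tokens out) := by unfold Spec_split_pre_and_post_punc; infer_instance

-- ===== CLAIM (what is proved, stated in full; the proofs are below) =====
def Claim_equal_split_pre_and_post_punc : Prop := ∀ (tokens : List String), Dom_split_pre_and_post_punc tokens → Spec_split_pre_and_post_punc tokens (split_pre_and_post_punc tokens)

-- ===== LEMMAS AND PROOFS =====

-- characterizations of A's loops
theorem prePuncLoop_all (t : List Char) (j : Nat)
    (h : ∀ k, j ≤ k → k < t.length → isPunc (t.getD k ' ')) : prePuncLoop t j = 0 := by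
  fun_induction prePuncLoop t j with
  | case1 j hlt hnp => exact absurd (h j le_rfl hlt) hnp
  | case2 j hlt hp ih => exact ih fun k hk hk2 => h k (by omega) hk2
  | case3 j h2 => rfl

theorem prePuncLoop_find (t : List Char) (j m : Nat) (hjm : j ≤ m) (hm : m < t.length)
    (hnp : ¬ isPunc (t.getD m ' ')) (hall : ∀ k, j ≤ k → k < m → isPunc (t.getD k ' ')) :
    prePuncLoop t j = m := by
  fun_induction prePuncLoop t j with
  | case1 j hlt hnp' =>
    by_contra hne
    exact hnp' (hall j le_rfl (by omega))
  | case2 j hlt hp ih =>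
    have hp' : isPunc (t.getD j ' ') := not_not.mp hp
    have hjm' : j ≠ m := fun h => hnp (h ▸ hp')
    exact ih (by omega) fun k hk hk2 => hall k (by omega) hk2
  | case3 j h2 => omega

theorem postPuncLoop_all (t : List Char) (j : Nat)
    (h : ∀ k, k < j → isPunc (t.getD k ' ')) : postPuncLoop t j = t.length := by
  induction j with
  | zero => rfl
  | succ j ih =>
    have hp : isPunc (t.getD j ' ') := h j (by omega)
    simp only [postPuncLoop, hp, not_true, reduceIte]
    exact ih fun k hk => h k (by omega)

theorem postPuncLoop_find (t : List Char) (j m : Nat) (hm : m < j)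
    (hnp : ¬ isPunc (t.getD m ' '))
    (hall : ∀ k, m < k → k < j → isPunc (t.getD k ' ')) : postPuncLoop t j = m + 1 := by
  induction j with
  | zero => omega
  | succ j ih =>
    by_cases hjm : j = m
    · subst hjm; simp [postPuncLoop, List.getD] at hnp ⊢; simp [hnp]
    · have hp : isPunc (t.getD j ' ') := hall j (by omega) (by omega)
      simp only [postPuncLoop, hp, not_true, reduceIte]
      exact ih (by omega) fun k hk hk2 => hall k hk (by omega)

-- characterizations of B's run decomposition
theorem spanLen_le (t : List Char) (p : Bool) (k : Nat) (hk : k ≤ t.length) :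
    spanLen t p k ≤ t.length := by
  fun_induction spanLen t p k with
  | case1 k hlt hp ih => exact ih (by omega)
  | case2 k hlt hnp => omega
  | case3 k h => omega

theorem spanLen_all (t : List Char) (p : Bool) (k : Nat) (hk : k ≤ t.length)
    (h : ∀ j, k ≤ j → j < t.length → isPunc (t.getD j ' ') = p) :
    spanLen t p k = t.length := by
  fun_induction spanLen t p k with
  | case1 k hlt hp ih => exact ih (by omega) fun j hj hj2 => h j (by omega) hj2
  | case2 k hlt hnp => exact absurd (h k le_rfl hlt) hnp
  | case3 k h2 => omega

theorem spanLen_find (t : List Char) (p : Bool) (k m : Nat) (hkm : k ≤ m) (hm : m < t.length)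
    (hnp : ¬ isPunc (t.getD m ' ') = p)
    (hall : ∀ j, k ≤ j → j < m → isPunc (t.getD j ' ') = p) : spanLen t p k = m := by
  fun_induction spanLen t p k with
  | case1 k hlt hp ih =>
    have hne : k ≠ m := fun h => hnp (h ▸ hp)
    exact ih (by omega) fun j hj hj2 => hall j (by omega) hj2
  | case2 k hlt hnp' =>
    by_contra hne
    exact hnp' (hall k le_rfl (by omega))
  | case3 k h2 => omega

theorem spanLen_flags (t : List Char) (p : Bool) (k : Nat) :
    ∀ j, k ≤ j → j < spanLen t p k → isPunc (t.getD j ' ') = p := by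
  fun_induction spanLen t p k with
  | case1 k hlt hp ih =>
    intro j hj hj2
    rcases Nat.eq_or_lt_of_le hj with rfl | h
    · exact hp
    · exact ih j h hj2
  | case2 k hlt hnp => intro j hj hj2; omega
  | case3 k h => intro j hj hj2; omega

theorem spanLen_stop (t : List Char) (p : Bool) (k : Nat)
    (h : spanLen t p k < t.length) : ¬ isPunc (t.getD (spanLen t p k) ' ') = p := by
  fun_induction spanLen t p k with
  | case1 k hlt hp ih => exact ih h
  | case2 k hlt hnp => exact hnp
  | case3 k h2 => omega

theorem runs_cons (c : Char) (cs : List Char) :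
    runs (c :: cs) = (isPunc c, (c :: cs).take (spanLen (c :: cs) (isPunc c) 1)) ::
      runs ((c :: cs).drop (spanLen (c :: cs) (isPunc c) 1)) := by
  simp [runs]

theorem runs_ne_nil (t : List Char) (h : t ≠ []) : runs t ≠ [] := by
  cases t with
  | nil => exact absurd rfl h
  | cons c cs => rw [runs_cons]; simp

theorem getLastD_irrel {α : Type} (l : List α) (h : l ≠ []) (d d' : α) :
    l.getLastD d = l.getLastD d' := by
  cases l with
  | nil => exact absurd rfl h
  | cons a as =>
    rw [List.getLastD_eq_getLast?, List.getLastD_eq_getLast?]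
    cases h2 : (a :: as).getLast? with
    | none => simp at h2
    | some x => rfl

-- all characters of the first run (including index 0) have the first flag
theorem runs_first_flags (c : Char) (cs : List Char) :
    ∀ j, j < spanLen (c :: cs) (isPunc c) 1 → isPunc ((c :: cs).getD j ' ') = isPunc c := by
  intro j hj
  rcases Nat.eq_zero_or_pos j with rfl | hpos
  · simp [List.getD]
  · exact spanLen_flags (c :: cs) (isPunc c) 1 j hpos hj

-- the flag of the last group is the punctuation flag of the last character
theorem runs_last_flag (n : Nat) (t : List Char) (hn : t.length ≤ n) (h : t ≠ []) :
    ((runs t).getLastD (false, [])).1 = isPunc (t.getD (t.length - 1) ' ') := by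
  induction n generalizing t with
  | zero =>
    cases t with
    | nil => exact absurd rfl h
    | cons c cs => simp at hn
  | succ n ih =>
    cases t with
    | nil => exact absurd rfl h
    | cons c cs =>
      rw [runs_cons]
      have hk1 : 1 ≤ spanLen (c :: cs) (isPunc c) 1 := spanLen_ge _ _ 1
      have hkle : spanLen (c :: cs) (isPunc c) 1 ≤ (c :: cs).length :=
        spanLen_le _ _ 1 (by simp)
      by_cases hdrop : (c :: cs).drop (spanLen (c :: cs) (isPunc c) 1) = []
      · have hkeq : spanLen (c :: cs) (isPunc c) 1 = (c :: cs).length := by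
          have := List.drop_eq_nil_iff.mp hdrop; omega
        rw [hdrop]
        simp only [runs, List.getLastD]
        exact (runs_first_flags c cs ((c :: cs).length - 1) (by omega)).symm
      · have hrne : runs ((c :: cs).drop (spanLen (c :: cs) (isPunc c) 1)) ≠ [] :=
          runs_ne_nil _ hdrop
        have hklt : spanLen (c :: cs) (isPunc c) 1 < (c :: cs).length := by
          have := List.drop_eq_nil_iff.not.mp hdrop; omega
        rw [List.getLastD_cons, getLastD_irrel _ hrne _ (false, []),
          ih ((c :: cs).drop (spanLen (c :: cs) (isPunc c) 1))
            (by simp only [List.length_drop, List.length_cons] at hn ⊢; omega) hdrop]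
        have hidx : spanLen (c :: cs) (isPunc c) 1 +
            (((c :: cs).drop (spanLen (c :: cs) (isPunc c) 1)).length - 1) =
            (c :: cs).length - 1 := by
          simp only [List.length_drop, List.length_cons] at hklt ⊢
          omega
        rw [List.getD, List.getD, List.getElem?_drop, hidx]

-- a single group means every character has the flag of the first character
theorem runs_len_one (c : Char) (cs : List Char) (h : (runs (c :: cs)).length = 1) :
    ∀ j, j < (c :: cs).length → isPunc ((c :: cs).getD j ' ') = isPunc c := by
  rw [runs_cons] at h
  simp only [List.length_cons] at h
  have hdrop : runs ((c :: cs).drop (spanLen (c :: cs) (isPunc c) 1)) = [] := by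
    cases hr : runs ((c :: cs).drop (spanLen (c :: cs) (isPunc c) 1)) with
    | nil => rfl
    | cons a as => rw [hr] at h; simp at h
  have hdnil : (c :: cs).drop (spanLen (c :: cs) (isPunc c) 1) = [] := by
    by_contra hc
    exact runs_ne_nil _ hc hdrop
  have hkle : spanLen (c :: cs) (isPunc c) 1 ≤ (c :: cs).length := spanLen_le _ _ 1 (by simp)
  have hkeq : spanLen (c :: cs) (isPunc c) 1 = (c :: cs).length := by
    have := List.drop_eq_nil_iff.mp hdnil; omega
  intro j hj
  exact runs_first_flags c cs j (by omega)

-- a run of a single flag is one group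
theorem runs_uniform (c : Char) (cs : List Char)
    (h : ∀ j, j < (c :: cs).length → isPunc ((c :: cs).getD j ' ') = isPunc c) :
    runs (c :: cs) = [(isPunc c, c :: cs)] := by
  have hk : spanLen (c :: cs) (isPunc c) 1 = (c :: cs).length :=
    spanLen_all _ _ 1 (by simp) fun j hj hj2 => h j hj2
  rw [runs_cons, hk]
  simp [runs]

-- the last group when the trailing m characters all have flag q and the one before differs
theorem runs_last (n : Nat) (t : List Char) (q : Bool) (m : Nat) (hn : t.length ≤ n)
    (htne : t ≠ []) (hm0 : 0 < m) (hmle : m ≤ t.length)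
    (hsuf : ∀ j, t.length - m ≤ j → j < t.length → isPunc (t.getD j ' ') = q)
    (hmax : m = t.length ∨ ¬ isPunc (t.getD (t.length - m - 1) ' ') = q) :
    (runs t).getLastD (false, []) = (q, t.drop (t.length - m)) := by
  induction n generalizing t with
  | zero =>
    cases t with
    | nil => exact absurd rfl htne
    | cons c cs => simp at hn
  | succ n ih =>
    cases t with
    | nil => exact absurd rfl htne
    | cons c cs =>
      rw [runs_cons]
      have hk1 : 1 ≤ spanLen (c :: cs) (isPunc c) 1 := spanLen_ge _ _ 1
      have hkle : spanLen (c :: cs) (isPunc c) 1 ≤ (c :: cs).length :=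
        spanLen_le _ _ 1 (by simp)
      by_cases hdrop : (c :: cs).drop (spanLen (c :: cs) (isPunc c) 1) = []
      · have hkeq : spanLen (c :: cs) (isPunc c) 1 = (c :: cs).length := by
          have := List.drop_eq_nil_iff.mp hdrop; omega
        -- all characters have flag (isPunc c); hence q = isPunc c and m = t.length
        have hqp : q = isPunc c := by
          have h1 := hsuf ((c :: cs).length - 1) (by omega) (by omega)
          have h2 := runs_first_flags c cs ((c :: cs).length - 1) (by omega)
          rw [h2] at h1
          exact h1.symm
        have hmeq : m = (c :: cs).length := by
          rcases hmax with h | h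
          · exact h
          · exact absurd (hqp ▸ runs_first_flags c cs ((c :: cs).length - m - 1) (by omega)) h
        rw [hdrop]
        simp only [runs, List.getLastD]
        rw [hqp, hmeq]
        simp [List.take_of_length_le (le_of_eq hkeq.symm)]
      · have hrne : runs ((c :: cs).drop (spanLen (c :: cs) (isPunc c) 1)) ≠ [] :=
          runs_ne_nil _ hdrop
        have hklt : spanLen (c :: cs) (isPunc c) 1 < (c :: cs).length := by
          have := List.drop_eq_nil_iff.not.mp hdrop; omega
        have hknp : ¬ isPunc ((c :: cs).getD (spanLen (c :: cs) (isPunc c) 1) ' ') = isPunc c :=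
          spanLen_stop (c :: cs) (isPunc c) 1 hklt
        -- the suffix run cannot reach the end of the first group
        have hkm : spanLen (c :: cs) (isPunc c) 1 ≤ (c :: cs).length - m := by
          by_contra hc
          push Not at hc
          have h1 : isPunc ((c :: cs).getD (spanLen (c :: cs) (isPunc c) 1 - 1) ' ') = isPunc c :=
            runs_first_flags c cs _ (by omega)
          have h2 : isPunc ((c :: cs).getD (spanLen (c :: cs) (isPunc c) 1 - 1) ' ') = q :=
            hsuf _ (by omega) (by omega)
          have h3 : isPunc ((c :: cs).getD (spanLen (c :: cs) (isPunc c) 1) ' ') = q :=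
            hsuf _ (by omega) (by omega)
          have hpq : isPunc c = q := by rw [← h1]; exact h2
          exact hknp (h3.trans hpq.symm)
        rw [List.getLastD_cons, getLastD_irrel _ hrne _ (false, []),
          ih ((c :: cs).drop (spanLen (c :: cs) (isPunc c) 1))
            (by simp only [List.length_drop, List.length_cons] at hn ⊢; omega) hdrop
            (by simp only [List.length_drop]; omega)
            (fun j hj hj2 => by
              simp only [List.length_drop] at hj hj2
              rw [List.getD, List.getElem?_drop, ← List.getD]
              exact hsuf _ (by omega) (by omega))
            (by
              rcases hmax with h | h
              · exact absurd h (by omega)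
              · by_cases hm' : ((c :: cs).drop (spanLen (c :: cs) (isPunc c) 1)).length = m
                · left; exact hm'.symm
                · right
                  simp only [List.length_drop] at hm' ⊢
                  rw [List.getD, List.getElem?_drop, ← List.getD]
                  have heq : spanLen (c :: cs) (isPunc c) 1 +
                      ((c :: cs).length - spanLen (c :: cs) (isPunc c) 1 - m - 1) =
                      (c :: cs).length - m - 1 := by omega
                  rw [heq]
                  exact h)]
        rw [List.drop_drop]
        congr 2
        simp only [List.length_drop]
        omega

-- t-level restatements of the runs lemmas (getD 0 of a cons is its head, definitionally)
theorem runs_head' (t : List Char) (h : t ≠ []) :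
    (runs t).headD (false, []) =
      (isPunc (t.getD 0 ' '), t.take (spanLen t (isPunc (t.getD 0 ' ')) 1)) := by
  cases t with
  | nil => exact absurd rfl h
  | cons c cs => rw [runs_cons]; rfl

theorem runs_uniform' (t : List Char) (h : t ≠ [])
    (hall : ∀ j, j < t.length → isPunc (t.getD j ' ') = isPunc (t.getD 0 ' ')) :
    runs t = [(isPunc (t.getD 0 ' '), t)] := by
  cases t with
  | nil => exact absurd rfl h
  | cons c cs => exact runs_uniform c cs hall

theorem runs_len_one' (t : List Char) (h : t ≠ []) (h1 : (runs t).length = 1) :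
    ∀ j, j < t.length → isPunc (t.getD j ' ') = isPunc (t.getD 0 ' ') := by
  cases t with
  | nil => exact absurd rfl h
  | cons c cs => exact runs_len_one c cs h1

-- helper list facts
theorem getD_drop (l : List Char) (i j : Nat) (d : Char) :
    (l.drop i).getD j d = l.getD (i + j) d := by
  simp [List.getD, List.getElem?_drop]

theorem take_of_drop (l : List Char) (i j : Nat) :
    (l.drop i).take j = (l.take (i + j)).drop i := by
  rw [List.drop_take]; congr 1; omega

theorem take_ne_nil (l : List Char) (i : Nat) (h : 0 < i) (h2 : 0 < l.length) :
    l.take i ≠ [] := by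
  simp [List.take_eq_nil_iff]
  constructor
  · omega
  · intro hc; subst hc; simp at h2

theorem drop_ne_nil (l : List Char) (i : Nat) (h : i < l.length) : l.drop i ≠ [] := by
  simp [List.drop_eq_nil_iff]; omega

-- the central per-token lemma: A's loop body produces exactly B's loop body
theorem procToken_eq (token : String) : procTokenA token = procTokenB token := by
  obtain ⟨t, rfl⟩ : ∃ t, token = String.ofList t := ⟨token.toList, by simp⟩
  unfold procTokenA procTokenB
  simp only [String.toList_ofList]
  by_cases hL : t.length ≤ 1
  · have h1 : ¬ (1 < t.length ∧ isPunc (t.getD 0 ' ') = true) := fun h => by omega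
    have h2 : ¬ (1 < t.length ∧ isPunc (t.getD (t.length - 1) ' ') = true) := fun h => by omega
    rw [if_neg h1, if_neg h2, if_pos hL]
  · push Not at hL
    have hLne : ¬ t.length ≤ 1 := by omega
    have htne : t ≠ [] := by intro h; rw [h] at hL; simp at hL
    have hlastflag := runs_last_flag t.length t le_rfl htne
    by_cases hall : ∀ k, k < t.length → isPunc (t.getD k ' ')
    · -- all characters are punctuation: both keep the token whole
      have hp0 : isPunc (t.getD 0 ' ') := hall 0 (by omega)
      have hpre : prePuncLoop t 1 = 0 := prePuncLoop_all t 1 fun k _ hk => hall k hk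
      have hpost : postPuncLoop t (t.length - 1) = t.length :=
        postPuncLoop_all t _ fun k hk => hall k (by omega)
      have hone : (runs t).length = 1 := by
        rw [runs_uniform' t htne (fun j hj => by rw [hall j hj, hall 0 (by omega)])]
        rfl
      rw [if_pos ⟨hL, hp0⟩, if_neg hLne, if_pos hone]
      simp [prePunc, hpre, postPunc, hpost, htne, List.take_of_length_le]
    · -- some non-punctuation character exists
      push Not at hall
      have hexd : ∃ m, m < t.length ∧ ¬ isPunc (t.getD m ' ') = true := by
        obtain ⟨m, hm1, hm2⟩ := hall; exact ⟨m, hm1, by simpa using hm2⟩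
      obtain ⟨hi0L, hi0np⟩ := Nat.find_spec hexd
      set i0 := Nat.find hexd with hi0def
      have hi0min : ∀ k, k < i0 → isPunc (t.getD k ' ') := by
        intro k hk
        have := Nat.find_min hexd hk
        by_contra hc
        exact this ⟨by omega, hc⟩
      obtain ⟨m0, hm0L, hm0np⟩ := hexd
      have hj0spec := Nat.findGreatest_spec (m := m0)
        (P := fun m => ¬ isPunc (t.getD m ' ') = true ∧ m < t.length)
        (by omega : m0 ≤ t.length - 1) ⟨hm0np, hm0L⟩
      set j0 := Nat.findGreatest
        (fun m => ¬ isPunc (t.getD m ' ') = true ∧ m < t.length) (t.length - 1) with hj0def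
      have hj0np : ¬ isPunc (t.getD j0 ' ') = true := hj0spec.1
      have hj0L : j0 < t.length := hj0spec.2
      have hj0max : ∀ k, j0 < k → k < t.length → isPunc (t.getD k ' ') := by
        intro k hk hkL
        by_contra hc
        exact Nat.findGreatest_is_greatest (k := k)
          (P := fun m => ¬ isPunc (t.getD m ' ') = true ∧ m < t.length)
          hk (by omega) ⟨hc, hkL⟩
      have hij : i0 ≤ j0 := by
        by_contra hc
        exact hi0np (hj0max i0 (by omega) hi0L)
      by_cases hp0 : isPunc (t.getD 0 ' ') = true
      · -- token starts with punctuation: A takes branch 1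
        have hi0pos : 0 < i0 := by
          rcases Nat.eq_zero_or_pos i0 with h | h
          · exact absurd (h ▸ hp0) hi0np
          · exact h
        have hpre : prePuncLoop t 1 = i0 :=
          prePuncLoop_find t 1 i0 (by omega) hi0L hi0np fun k _ hk => hi0min k hk
        have hspan : spanLen t (isPunc (t.getD 0 ' ')) 1 = i0 := by
          rw [hp0]
          exact spanLen_find t true 1 i0 (by omega) hi0L hi0np fun j hj hj2 => hi0min j hj2
        have hlen1 : ¬ (runs t).length = 1 := fun h =>
          hi0np (by rw [runs_len_one' t htne h i0 hi0L, hp0])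
        have hhead : (runs t).headD (false, []) = (true, t.take i0) := by
          rw [runs_head' t htne, hspan, hp0]
        rw [if_pos ⟨hL, hp0⟩, if_neg hLne, if_neg hlen1, hhead]
        have hane : t.take i0 ≠ [] := take_ne_nil t i0 hi0pos (by omega)
        have hbne : t.drop i0 ≠ [] := drop_ne_nil t i0 hi0L
        have hprelen : (t.take i0).length = i0 := by simp; omega
        by_cases hplast : isPunc (t.getD (t.length - 1) ' ') = true
        · -- punctuation at both ends
          have hj0lt : j0 < t.length - 1 := by
            have : j0 ≠ t.length - 1 := fun h => hj0np (h ▸ hplast)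
            omega
          have hgl : (runs t).getLastD (false, []) = (true, t.drop (j0 + 1)) := by
            have harith : t.length - (t.length - (j0 + 1)) = j0 + 1 := by omega
            have := runs_last t.length t true (t.length - (j0 + 1))
              le_rfl htne (by omega) (by omega)
              (fun j hj hj2 => by
                rw [harith] at hj
                exact hj0max j (by omega) hj2)
              (Or.inr (by
                have h2 : t.length - (t.length - (j0 + 1)) - 1 = j0 := by omega
                rw [h2]
                exact hj0np))
            rw [this, harith]
          have hpost : postPuncLoop (t.drop i0) ((t.drop i0).length - 1) = (j0 - i0) + 1 := by
            apply postPuncLoop_find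
            · simp; omega
            · rw [getD_drop]
              have : i0 + (j0 - i0) = j0 := by omega
              rw [this]; exact hj0np
            · intro k hk hk2
              rw [getD_drop]
              refine hj0max (i0 + k) (by omega) ?_
              simp at hk2; omega
          have hcore : (t.drop i0).take (j0 - i0 + 1) = (t.take (j0 + 1)).drop i0 := by
            rw [take_of_drop]; congr 2; omega
          have hsufeq : (t.drop i0).drop (j0 - i0 + 1) = t.drop (j0 + 1) := by
            rw [List.drop_drop]; congr 1; omega
          have hcne : (t.take (j0 + 1)).drop i0 ≠ [] := by
            simp [List.drop_eq_nil_iff]; omega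
          have hdne : t.drop (j0 + 1) ≠ [] := drop_ne_nil _ _ (by omega)
          have hpost' : postPuncLoop (t.drop i0) (t.length - i0 - 1) = j0 - i0 + 1 := by
            simpa using hpost
          have heq1 : i0 + (t.length - i0 - 1) = t.length - 1 := by omega
          have hplast' : isPunc (t[t.length - 1]?.getD ' ') = true := by
            simpa [List.getD] using hplast
          have hsuflen : (t.drop (j0 + 1)).length = t.length - (j0 + 1) := by simp
          have htakelen : t.length - (t.length - (j0 + 1)) = j0 + 1 := by omega
          rw [hgl]
          simp only [hprelen]
          have hmin : min i0 t.length = i0 := by omega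
          simp [prePunc, hpre, postPunc, hpost', hane, hbne, hplast', heq1,
            hcore, hsufeq, hcne, hdne, htakelen, hmin, List.getD]
        · -- punctuation only at the start: the last group is non-punctuation
          have hglf : ((runs t).getLastD (false, [])).1 = false := by
            rw [hlastflag]
            simpa using hplast
          have hj0eq : j0 = t.length - 1 := by
            by_contra hc
            exact hplast (hj0max (t.length - 1) (by omega) (by omega))
          have heq1 : i0 + (t.length - i0 - 1) = t.length - 1 := by omega
          have hplast' : ¬ isPunc (t[t.length - 1]?.getD ' ') = true := by
            simpa [List.getD] using hplast
          rw [hglf]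
          simp only [hprelen]
          have hmin : min i0 t.length = i0 := by omega
          simp [prePunc, hpre, hane, hbne, heq1, hplast', hmin, List.take_of_length_le]
      · -- token does not start with punctuation: i0 = 0
        have hi00 : i0 = 0 := by
          rcases Nat.eq_zero_or_pos i0 with h | h
          · exact h
          · exact absurd (hi0min 0 h) hp0
        have hA : ¬ (1 < t.length ∧ isPunc (t.getD 0 ' ') = true) := fun h => hp0 h.2
        rw [if_neg hA]
        by_cases hplast : isPunc (t.getD (t.length - 1) ' ') = true
        · -- punctuation only at the end: A takes branch 2
          have hlen1 : ¬ (runs t).length = 1 := fun h =>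
            hp0 (by
              rw [← runs_len_one' t htne h (t.length - 1) (by omega)]
              exact hplast)
          have hj0lt : j0 < t.length - 1 := by
            have : j0 ≠ t.length - 1 := fun h => hj0np (h ▸ hplast)
            omega
          have hpost : postPuncLoop t (t.length - 1) = j0 + 1 :=
            postPuncLoop_find t _ j0 (by omega) hj0np fun k hk hk2 => hj0max k hk (by omega)
          have hgl : (runs t).getLastD (false, []) = (true, t.drop (j0 + 1)) := by
            have harith : t.length - (t.length - (j0 + 1)) = j0 + 1 := by omega
            have := runs_last t.length t true (t.length - (j0 + 1))
              le_rfl htne (by omega) (by omega)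
              (fun j hj hj2 => by
                rw [harith] at hj
                exact hj0max j (by omega) hj2)
              (Or.inr (by
                have h2 : t.length - (t.length - (j0 + 1)) - 1 = j0 := by omega
                rw [h2]
                exact hj0np))
            rw [this, harith]
          have hheadf : ((runs t).headD (false, [])).1 = false := by
            rw [runs_head' t htne]
            simpa using hp0
          rw [if_pos ⟨hL, hplast⟩, if_neg hLne, if_neg hlen1, hgl, hheadf]
          have hane : t.take (j0 + 1) ≠ [] := take_ne_nil _ _ (by omega) (by omega)
          have hbne : t.drop (j0 + 1) ≠ [] := drop_ne_nil _ _ (by omega)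
          have hsuflen : (t.drop (j0 + 1)).length = t.length - (j0 + 1) := by simp
          have htakelen : t.length - (t.length - (j0 + 1)) = j0 + 1 := by omega
          simp [postPunc, hpost, hane, hbne, htakelen]
        · -- no punctuation at either end: both keep the token whole
          have hA2 : ¬ (1 < t.length ∧ isPunc (t.getD (t.length - 1) ' ') = true) :=
            fun h => hplast h.2
          rw [if_neg hA2, if_neg hLne]
          by_cases hlen1 : (runs t).length = 1
          · rw [if_pos hlen1]
          · have hheadf : ((runs t).headD (false, [])).1 = false := by
              rw [runs_head' t htne]
              simpa using hp0
            have hglf : ((runs t).getLastD (false, [])).1 = false := by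
              rw [hlastflag]
              simpa using hplast
            rw [if_neg hlen1, hheadf, hglf]
            simp

theorem foldl_eq (tokens : List String) (acc : List String) :
    tokens.foldl (fun acc token => acc ++ procTokenA token) acc =
    tokens.foldl (fun acc token => acc ++ procTokenB token) acc := by
  simp only [procToken_eq]

-- ===== VERDICT (by name: the statement is the Claim_ definition above) =====
theorem split_pre_and_post_punc_spec : Claim_equal_split_pre_and_post_punc := by
  intro tokens _
  unfold Spec_split_pre_and_post_punc split_pre_and_post_punc split_pre_and_post_punc_alt
  exact foldl_eq tokens []
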